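-- pv_equiv track=rewrite | github.com/rilistx/hillel | additional lessons/examples code/my_task.py | squared_digits_series
-- ===== SOURCE A (Python) =====
-- def squared_digits_series(n):
--     num = 1
--     number = 0
--
--     while n > 0:
--         for j in range(num):
--             n -= 1
--             number += (num * 10) + 1
--             if not n:
--                 break
--         num *= 2
--         if not n:
--             break
--
--     return number
-- ===== SOURCE B (Python) =====
-- def squared_digits_series(n):
--     total = 0
--     size = 1
--     while n > 0:
--         t = min(size, n)
--         total += t * (size * 10 + 1)
--         n -= t
--         size *= 2
--     return total
-- ===== Notes on version B (the rewrite author's own statement) =====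
-- stated objective: faster
-- what changed: Replaces the per-term inner loop (n iterations, one term at a time) by a per-block closed form: each doubling-size block contributes min(size, remaining) * (size*10+1) at once, so only O(log n) iterations.
import Mathlib
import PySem

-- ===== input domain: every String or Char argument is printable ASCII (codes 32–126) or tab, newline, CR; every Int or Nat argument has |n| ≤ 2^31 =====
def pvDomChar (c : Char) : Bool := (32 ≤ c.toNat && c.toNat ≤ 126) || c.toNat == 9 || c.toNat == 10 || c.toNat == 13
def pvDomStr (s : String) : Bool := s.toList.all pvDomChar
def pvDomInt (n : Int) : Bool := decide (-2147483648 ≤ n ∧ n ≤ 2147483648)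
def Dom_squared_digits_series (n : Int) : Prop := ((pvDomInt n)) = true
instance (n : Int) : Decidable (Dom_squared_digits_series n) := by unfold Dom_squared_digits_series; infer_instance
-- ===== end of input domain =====

-- B sums each doubling-size block's contribution in one closed-form step (O(log n) iterations)
-- instead of A's one-term-at-a-time inner loop; equivalence is total (no Pre_).

-- ===== PORT A =====
-- inner 'for j in range(num)' loop: decrement n, add (num*10)+1, break when n hits 0
def pvInnerA (num : Int) (j : Nat) (n number : Int) : Int × Int :=
  match j with
  | 0 => (n, number)
  | j + 1 =>
    let n' := n - 1
    let number' := number + (num * 10 + 1)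
    if n' = 0 then (n', number') else pvInnerA num j n' number'

-- outer 'while n > 0' loop; fuel only makes the recursion total, it is never exhausted on real calls
def pvOuterA (fuel : Nat) (n num number : Int) : Int :=
  match fuel with
  | 0 => number
  | fuel + 1 =>
    if n > 0 then
      let p := pvInnerA num num.toNat n number
      if p.1 = 0 then p.2 else pvOuterA fuel p.1 (num * 2) p.2
    else number

def squared_digits_series (n : Int) : Int := pvOuterA n.toNat n 1 0

-- ===== PORT B =====
def pvLoopB (fuel : Nat) (n size total : Int) : Int :=
  match fuel with
  | 0 => total
  | fuel + 1 =>
    if n > 0 then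
      let t := min size n
      pvLoopB fuel (n - t) (size * 2) (total + t * (size * 10 + 1))
    else total

def squared_digits_series_alt (n : Int) : Int := pvLoopB n.toNat n 1 0

-- ===== PRECONDITION & SPEC =====
def Spec_squared_digits_series (n : Int) (out : Int) : Prop := out = squared_digits_series_alt n
instance (n : Int) (out : Int) : Decidable (Spec_squared_digits_series n out) := by unfold Spec_squared_digits_series; infer_instance

-- ===== CLAIM (what is proved, stated in full; the proofs are below) =====
def Claim_equal_squared_digits_series : Prop := ∀ (n : Int), Dom_squared_digits_series n → Spec_squared_digits_series n (squared_digits_series n)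

-- ===== LEMMAS AND PROOFS =====

-- the inner loop performs min j n steps (it breaks the moment n reaches 0)
theorem pvInnerA_eq (num : Int) (j : Nat) (n number : Int) (hn : 1 ≤ n) :
    pvInnerA num j n number
      = (n - min (j : Int) n, number + min (j : Int) n * (num * 10 + 1)) := by
  induction j generalizing n number with
  | zero =>
    simp [pvInnerA]
    omega
  | succ j ih =>
    simp only [pvInnerA]
    by_cases h : n - 1 = 0
    · simp [h]
      constructor
      · omega
      · have : min ((j : Int) + 1) n = 1 := by omega
        rw [this]; ring
    · simp [h]
      rw [ih (n - 1) (number + (num * 10 + 1)) (by omega)]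
      have hm : min ((j : Int) + 1) n = min (j : Int) (n - 1) + 1 := by omega
      rw [hm]
      simp only [Prod.mk.injEq]
      exact ⟨by ring, by ring⟩

theorem pvLoopB_nonpos (fuel : Nat) (n size total : Int) (h : ¬ n > 0) :
    pvLoopB fuel n size total = total := by
  cases fuel with
  | zero => simp [pvLoopB]
  | succ f => simp [pvLoopB, h]

theorem pvOuterA_eq_pvLoopB (fuel : Nat) (n num number : Int)
    (hnum : 1 ≤ num) (hfuel : n ≤ (fuel : Int)) :
    pvOuterA fuel n num number = pvLoopB fuel n num number := by
  induction fuel generalizing n num number with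
  | zero => simp [pvOuterA, pvLoopB]
  | succ f ih =>
    by_cases hn : n > 0
    · simp only [pvOuterA, pvLoopB, if_pos hn]
      rw [pvInnerA_eq num num.toNat n number (by omega)]
      have htn : ((num.toNat : Int)) = num := Int.toNat_of_nonneg (by omega)
      rw [htn]
      have hmin1 : 1 ≤ min num n := by omega
      by_cases hz : n - min num n = 0
      · simp only [hz]
        simp [pvLoopB_nonpos f 0 (num*2) _ (by omega)]
      · simp only [if_neg hz]
        exact ih (n - min num n) (num * 2) _ (by omega) (by omega)
    · simp [pvOuterA, pvLoopB, hn]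

-- ===== VERDICT (by name: the statement is the Claim_ definition above) =====
theorem squared_digits_series_spec : Claim_equal_squared_digits_series := by
  intro n _
  unfold Spec_squared_digits_series squared_digits_series squared_digits_series_alt
  exact pvOuterA_eq_pvLoopB n.toNat n 1 0 (by norm_num) (by omega)
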